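-- pv_equiv track=rewrite | github.com/malleswar0511/Leetcodes-problems | nearest_larger_subnumbers.py | nearest_subnumber
-- ===== SOURCE A (Python) =====
-- def nearest_subnumber(n1: int, n2: int) -> int:
--     s = str(n1)
--     subnumbers = []
--
--     # Generate all possible contiguous subnumbers
--     for i in range(len(s)):
--         for j in range(i+1, len(s)+1):
--             subnumbers.append(int(s[i:j]))
--
--     # First, filter subnumbers that are >= n2
--     larger_or_equal = [x for x in subnumbers if x >= n2]
--
--     if larger_or_equal:
--         # Pick the one with smallest difference among larger ones
--         return min(larger_or_equal, key=lambda x: abs(x - n2))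
--     else:
--         # If no larger subnumber exists, fallback to closest smaller
--         return min(subnumbers, key=lambda x: abs(x - n2))
-- ===== SOURCE B (Python) =====
-- def nearest_subnumber(n1: int, n2: int) -> int:
--     # Different algorithm: the answer depends only on the SET of substring-numbers
--     # (for x >= n2 the abs-diff is minimised by the smallest such x; if all are
--     # smaller, by the largest).  So: collect the distinct values by length-major
--     # enumeration, sort them, and return the first >= n2, else the largest (last).
--     s = str(n1)
--     cands = sorted({int(s[i:i + L])
--                     for L in range(1, len(s) + 1)
--                     for i in range(len(s) - L + 1)})
--     for x in cands:
--         if x >= n2: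
--             return x
--     return cands[-1]
-- ===== Notes on version B (the rewrite author's own statement) =====
-- stated objective: alternative
-- what changed: B replaces A's filter-then-two-min()-by-abs-diff reductions with a value-order algorithm: it collects the DISTINCT substring-numbers (length-major set comprehension instead of A's start-major list), sorts them, and returns the first element >= n2, else the last (the maximum), using the fact that abs-diff to n2 is monotone on each side of n2.
import Mathlib
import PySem

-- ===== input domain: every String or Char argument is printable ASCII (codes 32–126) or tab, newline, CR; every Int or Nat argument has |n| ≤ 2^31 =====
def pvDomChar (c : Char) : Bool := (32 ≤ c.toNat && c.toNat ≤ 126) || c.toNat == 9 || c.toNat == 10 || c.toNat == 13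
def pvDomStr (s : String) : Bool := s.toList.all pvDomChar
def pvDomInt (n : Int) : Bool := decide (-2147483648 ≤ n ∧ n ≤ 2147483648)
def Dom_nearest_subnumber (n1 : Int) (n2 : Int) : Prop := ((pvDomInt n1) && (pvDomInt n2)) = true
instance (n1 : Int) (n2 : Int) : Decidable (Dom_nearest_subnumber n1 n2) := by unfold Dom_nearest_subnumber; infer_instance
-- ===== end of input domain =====

-- B replaces A's filter + two min-by-abs-diff reductions by sorting the set of distinct substring-numbers
-- (collected length-major) and returning the first element >= n2, else the last (alternative algorithm).


-- ===== PORT A =====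
def nearest_subnumber (n1 : Int) (n2 : Int) : Int :=
  let s := PySem.Int.toChars n1
  let subnumbers : List Int :=
    (PySem.List.pyRange 0 (s.length : Int) 1).foldl (fun acc i =>
      (PySem.List.pyRange (i + 1) ((s.length : Int) + 1) 1).foldl (fun acc2 j =>
        acc2 ++ [(PySem.Int.ofChars? (PySem.List.slice s (some i) (some j))).getD 0]) acc) []
  let larger_or_equal := subnumbers.filter (fun x => decide (n2 ≤ x))
  match PySem.List.min? larger_or_equal (fun x => |x - n2|) with
  | some m => m
  | none => (PySem.List.min? subnumbers (fun x => |x - n2|)).getD 0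

-- ===== PORT B =====
def nearest_subnumber_alt (n1 : Int) (n2 : Int) : Int :=
  let s := PySem.Int.toChars n1
  let cands := PySem.List.sorted (PySem.Set.ofList (
      (PySem.List.pyRange 1 ((s.length : Int) + 1) 1).flatMap (fun L =>
        (PySem.List.pyRange 0 ((s.length : Int) - L + 1) 1).map (fun i =>
          (PySem.Int.ofChars? (PySem.List.slice s (some i) (some (i + L)))).getD 0))))
    (fun x => x)
  match cands.find? (fun x => decide (n2 ≤ x)) with
  | some x => x
  | none => PySem.List.pyGetD cands (-1) 0

-- ===== PRECONDITION & SPEC =====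
-- Pre_ excludes exactly negative n1: there str(n1) starts with '-', the first substring is "-" and
-- Python A raises ValueError on int('-') (B raises there too); it excludes no input on which A returns.
def Pre_nearest_subnumber (n1 : Int) (n2 : Int) : Prop := 0 ≤ n1
instance (n1 : Int) (n2 : Int) : Decidable (Pre_nearest_subnumber n1 n2) := by unfold Pre_nearest_subnumber; infer_instance
def pvWitness_nearest_subnumber : Int × Int := (1234, 27)

def Spec_nearest_subnumber (n1 : Int) (n2 : Int) (out : Int) : Prop := out = nearest_subnumber_alt n1 n2
instance (n1 : Int) (n2 : Int) (out : Int) : Decidable (Spec_nearest_subnumber n1 n2 out) := by unfold Spec_nearest_subnumber; infer_instance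

-- ===== CLAIM (what is proved, stated in full; the proofs are below) =====
def Claim_equal_nearest_subnumber : Prop := ∀ (n1 : Int) (n2 : Int), Dom_nearest_subnumber n1 n2 → Pre_nearest_subnumber n1 n2 → Spec_nearest_subnumber n1 n2 (nearest_subnumber n1 n2)

-- ===== LEMMAS AND PROOFS =====

-- the substring-number int(s[i:j]) both programs compute
def pvParse (s : List Char) (i j : Int) : Int :=
  (PySem.Int.ofChars? (PySem.List.slice s (some i) (some j))).getD 0

-- A's candidate list (start-major) and B's candidate list (length-major)
def pvSA (s : List Char) : List Int :=
  (PySem.List.pyRange 0 (s.length : Int) 1).flatMap (fun i =>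
    (PySem.List.pyRange (i + 1) ((s.length : Int) + 1) 1).map (fun j => pvParse s i j))

def pvSB (s : List Char) : List Int :=
  (PySem.List.pyRange 1 ((s.length : Int) + 1) 1).flatMap (fun L =>
    (PySem.List.pyRange 0 ((s.length : Int) - L + 1) 1).map (fun i => pvParse s i (i + L)))

-- A's nested append fold builds the flatMap of candidates
theorem pv_nested_append {α β : Type} (f : α → β → Int) (L : List α) (inner : α → List β)
    (acc : List Int) :
    L.foldl (fun acc i => (inner i).foldl (fun a2 j => a2 ++ [f i j]) acc) acc
      = acc ++ L.flatMap (fun i => (inner i).map (f i)) := by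
  induction L generalizing acc with
  | nil => simp
  | cons i L ih =>
    simp only [List.foldl_cons, List.flatMap_cons]
    rw [PySem.List.foldl_append_singleton_eq_map, ih, List.append_assoc]

theorem pvA_eq (n1 n2 : Int) :
    nearest_subnumber n1 n2 =
      (match PySem.List.min? ((pvSA (PySem.Int.toChars n1)).filter (fun x => decide (n2 ≤ x)))
          (fun x => |x - n2|) with
      | some m => m
      | none => (PySem.List.min? (pvSA (PySem.Int.toChars n1)) (fun x => |x - n2|)).getD 0) := by
  unfold nearest_subnumber pvSA pvParse
  simp only
  rw [pv_nested_append, List.nil_append]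

theorem pvB_eq (n1 n2 : Int) :
    nearest_subnumber_alt n1 n2 =
      (match (PySem.List.sorted (PySem.Set.ofList (pvSB (PySem.Int.toChars n1))) (fun x => x)).find?
          (fun x => decide (n2 ≤ x)) with
      | some x => x
      | none => PySem.List.pyGetD
          (PySem.List.sorted (PySem.Set.ofList (pvSB (PySem.Int.toChars n1))) (fun x => x)) (-1) 0) := rfl

-- same candidates: both lists enumerate { int(s[i:j]) | 0 ≤ i < j ≤ len s }
theorem pv_mem_SA_iff (s : List Char) (x : Int) :
    x ∈ pvSA s ↔ ∃ i j : Int, 0 ≤ i ∧ i + 1 ≤ j ∧ j ≤ (s.length : Int) ∧ x = pvParse s i j := by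
  unfold pvSA
  simp only [List.mem_flatMap, List.mem_map, PySem.List.mem_pyRange_one]
  constructor
  · rintro ⟨i, ⟨hi0, hil⟩, j, ⟨hj1, hj2⟩, rfl⟩
    exact ⟨i, j, hi0, hj1, by omega, rfl⟩
  · rintro ⟨i, j, hi0, hj1, hj2, rfl⟩
    exact ⟨i, ⟨hi0, by omega⟩, j, ⟨hj1, by omega⟩, rfl⟩

theorem pv_mem_SB_iff (s : List Char) (x : Int) :
    x ∈ pvSB s ↔ ∃ i j : Int, 0 ≤ i ∧ i + 1 ≤ j ∧ j ≤ (s.length : Int) ∧ x = pvParse s i j := by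
  unfold pvSB
  simp only [List.mem_flatMap, List.mem_map, PySem.List.mem_pyRange_one]
  constructor
  · rintro ⟨L, ⟨hL1, hL2⟩, i, ⟨hi0, hi2⟩, rfl⟩
    exact ⟨i, i + L, hi0, by omega, by omega, rfl⟩
  · rintro ⟨i, j, hi0, hj1, hj2, rfl⟩
    refine ⟨j - i, ⟨by omega, by omega⟩, i, ⟨hi0, by omega⟩, ?_⟩
    have h : i + (j - i) = j := by omega
    rw [h]

theorem pv_mem_iff (s : List Char) (x : Int) : x ∈ pvSB s ↔ x ∈ pvSA s := by
  rw [pv_mem_SA_iff, pv_mem_SB_iff]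

-- str(n1) is never the empty string
theorem pv_tdc_ne (b : Nat) : ∀ (fuel n : Nat) (ds : List Char), ds ≠ [] →
    Nat.toDigitsCore b fuel n ds ≠ [] := by
  intro fuel
  induction fuel with
  | zero => intro n ds h; simpa [Nat.toDigitsCore] using h
  | succ f ih =>
    intro n ds h
    rw [Nat.toDigitsCore]
    split
    · simp
    · exact ih _ _ (by simp)

theorem pv_toChars_ne (n : Int) : PySem.Int.toChars n ≠ [] := by
  unfold PySem.Int.toChars
  split
  · simp
  · rw [Nat.toDigits, Nat.toDigitsCore]
    split
    · simp
    · exact pv_tdc_ne _ _ _ _ (by simp)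

theorem pv_SA_ne (s : List Char) (hs : s ≠ []) : pvSA s ≠ [] := by
  have hlen : 0 < s.length := List.length_pos_iff.mpr hs
  have hmem : pvParse s 0 1 ∈ pvSA s := by
    rw [pv_mem_SA_iff]
    exact ⟨0, 1, le_refl 0, le_refl 1, by exact_mod_cast hlen, rfl⟩
  exact List.ne_nil_of_mem hmem

-- membership in B's sorted deduplicated candidate list
theorem pv_mem_cands (s : List Char) (x : Int) :
    x ∈ PySem.List.sorted (PySem.Set.ofList (pvSB s)) (fun x => x) ↔ x ∈ pvSA s := by
  rw [PySem.List.mem_sorted, PySem.Set.mem_ofList, pv_mem_iff]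

-- ===== VERDICT (by name: the statement is the Claim_ definition above) =====
theorem nearest_subnumber_spec : Claim_equal_nearest_subnumber := by
  intro n1 n2 _ _
  unfold Spec_nearest_subnumber
  rw [pvA_eq, pvB_eq]
  set s := PySem.Int.toChars n1 with hs
  set t := PySem.List.sorted (PySem.Set.ofList (pvSB s)) (fun x => x) with ht
  have hsorted : t.Pairwise (· < ·) := PySem.List.sorted_ofList_pairwise_lt _
  have hSAne : pvSA s ≠ [] := pv_SA_ne s (pv_toChars_ne n1)
  by_cases hge : ∃ x ∈ pvSA s, n2 ≤ x
  · -- some candidate ≥ n2 exists: A's filter is nonempty, B's find? fires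
    obtain ⟨x₀, hx₀, hx₀ge⟩ := hge
    cases hmin : PySem.List.min? ((pvSA s).filter (fun x => decide (n2 ≤ x))) (fun x => |x - n2|) with
    | none =>
      rw [PySem.List.min?_eq_none_iff] at hmin
      exact absurd hmin (List.ne_nil_of_mem (List.mem_filter.mpr ⟨hx₀, by simpa using hx₀ge⟩))
    | some m =>
      cases hf : t.find? (fun x => decide (n2 ≤ x)) with
      | none =>
        rw [List.find?_eq_none] at hf
        exact absurd (by simpa using hf x₀ ((pv_mem_cands s x₀).mpr hx₀)) (by simpa using hx₀ge)
      | some b =>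
        simp only
        -- facts about m
        have hmF := PySem.List.min?_mem hmin
        have hmSA : m ∈ pvSA s := (List.mem_filter.mp hmF).1
        have hmge : n2 ≤ m := by simpa using (List.mem_filter.mp hmF).2
        have hmin' := PySem.List.min?_isMin hmin
        -- facts about b
        obtain ⟨hbp, as, bs, hsplit, hfail⟩ := List.find?_eq_some_iff_append.mp hf
        have hbge : n2 ≤ b := by simpa using hbp
        have hbSA : b ∈ pvSA s := (pv_mem_cands s b).mp (show b ∈ t by rw [hsplit]; simp)
        -- m ≤ b
        have h1 : |m - n2| ≤ |b - n2| :=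
          hmin' b (List.mem_filter.mpr ⟨hbSA, by simpa using hbge⟩)
        rw [abs_of_nonneg (by omega), abs_of_nonneg (by omega)] at h1
        -- b ≤ m
        have hmT : m ∈ t := (pv_mem_cands s m).mpr hmSA
        rw [hsplit] at hmT hsorted
        have h2 : b ≤ m := by
          rcases List.mem_append.mp hmT with hmas | hmb
          · exact absurd hmge (by simpa using hfail m hmas)
          · rcases List.mem_cons.mp hmb with rfl | hmbs
            · exact le_refl m
            · exact le_of_lt ((List.pairwise_cons.mp (List.pairwise_append.mp hsorted).2.1).1 m hmbs)
        omega
  · -- every candidate < n2: A falls back to the overall min, B's find? fails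
    push Not at hge
    have hfilter : (pvSA s).filter (fun x => decide (n2 ≤ x)) = [] := by
      rw [List.filter_eq_nil_iff]
      intro x hx
      simpa using hge x hx
    rw [hfilter]
    have hf : t.find? (fun x => decide (n2 ≤ x)) = none := by
      rw [List.find?_eq_none]
      intro x hx
      simpa using hge x ((pv_mem_cands s x).mp hx)
    rw [hf]
    cases hmin : PySem.List.min? (pvSA s) (fun x => |x - n2|) with
    | none => exact absurd ((PySem.List.min?_eq_none_iff _ _).mp hmin) hSAne
    | some m =>
      have hmSA : m ∈ pvSA s := PySem.List.min?_mem hmin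
      have hmin' := PySem.List.min?_isMin hmin
      have htne : t ≠ [] := by
        intro h
        have hmT : m ∈ t := (pv_mem_cands s m).mpr hmSA
        rw [h] at hmT
        simp at hmT
      have hlp : 0 < t.length := List.length_pos_iff.mpr htne
      rw [PySem.List.pyGetD_neg_one t 0 htne]
      show m = t.getLast htne
      -- the last element of the strictly sorted t is its maximum
      have hlastSA : t.getLast htne ∈ pvSA s := (pv_mem_cands s _).mp (List.getLast_mem htne)
      -- m ≤ last
      have hmT : m ∈ t := (pv_mem_cands s m).mpr hmSA
      obtain ⟨p, hp, hpe⟩ := List.mem_iff_getElem.mp hmT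
      have hlast_eq : t.getLast htne = t[t.length - 1] :=
        List.getLast_eq_getElem htne
      have h1 : m ≤ t.getLast htne := by
        rw [hlast_eq, ← hpe]
        exact PySem.List.sorted_id_getElem_mono (PySem.Set.ofList (pvSB s)) (by omega) (show t.length - 1 < t.length by omega)
      -- last ≤ m : m minimises |· - n2| and everything is < n2
      have h2 : |m - n2| ≤ |t.getLast htne - n2| := hmin' _ hlastSA
      have hm_lt : m < n2 := hge m hmSA
      have hl_lt : t.getLast htne < n2 := hge _ hlastSA
      rw [abs_of_nonpos (by omega), abs_of_nonpos (by omega)] at h2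
      omega
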